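-- pv_equiv track=rewrite | github.com/eitherWei/keyPhraseExtractionRed | methods_main2.py | rankLocationIndex
-- ===== SOURCE A (Python) =====
-- def rankLocationIndex(indexList):
--     cups = [15, 100, 500, 1000, 0]
--     notPresent = 0
--     zero = 0
--     one = 0
--     two = 0
--     three = 0
--     four = 0
--     for docIndex in indexList:
--         for index in docIndex:
--             if index == -1:
--                 notPresent = notPresent + 1
--             elif index < cups[0]:
--                 zero = zero + 1
--             elif index < cups[1]:
--                 one = one + 1
--             elif index < cups[2]:
--                 two = two + 1
--             elif index < cups[3]:
--                 three = three + 1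
--             else:
--                 four = four + 1
--
--     return [zero, one, two, three, four, notPresent]
-- ===== SOURCE B (Python) =====
-- def rankLocationIndex(indexList):
--     flat = [index for docIndex in indexList for index in docIndex]
--     notPresent = flat.count(-1)
--     cum15, cum100, cum500, cum1000 = (
--         sum(1 for x in flat if x != -1 and x < t) for t in (15, 100, 500, 1000))
--     present = len(flat) - notPresent
--     return [cum15, cum100 - cum15, cum500 - cum100,
--             cum1000 - cum500, present - cum1000, notPresent]
-- ===== Notes on version B (the rewrite author's own statement) =====
-- stated objective: alternative
-- what changed: Instead of one pass that dispatches each value through an elif cascade into six counters, B flattens the input once and derives the buckets arithmetically from staged cumulative counts (how many non-(-1) values lie below each threshold), taking differences of adjacent cumulative counts plus a total/length identity for the last bucket.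
import Mathlib
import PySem

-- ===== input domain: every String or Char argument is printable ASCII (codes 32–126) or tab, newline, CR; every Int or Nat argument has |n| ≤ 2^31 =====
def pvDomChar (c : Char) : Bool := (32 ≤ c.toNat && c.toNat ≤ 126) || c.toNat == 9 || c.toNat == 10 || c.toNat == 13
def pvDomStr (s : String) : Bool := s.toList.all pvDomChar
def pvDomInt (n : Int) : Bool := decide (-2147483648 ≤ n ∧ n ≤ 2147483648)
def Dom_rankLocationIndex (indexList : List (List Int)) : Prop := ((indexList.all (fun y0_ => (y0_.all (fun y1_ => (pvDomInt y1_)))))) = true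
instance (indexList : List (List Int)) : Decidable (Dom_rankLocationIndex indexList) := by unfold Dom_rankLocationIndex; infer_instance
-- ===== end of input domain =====

-- B replaces the single-pass elif-cascade over six counters by staged cumulative counts over the
-- flattened list, recovering each bucket as a difference of adjacent cumulative counts
-- (alternative decomposition; same asymptotic cost).

-- ===== PORT A =====
def rankLocationIndex (indexList : List (List Int)) : List Int :=
  let cups : List Int := [15, 100, 500, 1000, 0]
  let s :=
    indexList.foldl (fun s docIndex =>
      docIndex.foldl (fun (s : Int × Int × Int × Int × Int × Int) index =>
        let (zero, one, two, three, four, notPresent) := s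
        if index == -1 then (zero, one, two, three, four, notPresent + 1)
        else if index < cups.getD 0 0 then (zero + 1, one, two, three, four, notPresent)
        else if index < cups.getD 1 0 then (zero, one + 1, two, three, four, notPresent)
        else if index < cups.getD 2 0 then (zero, one, two + 1, three, four, notPresent)
        else if index < cups.getD 3 0 then (zero, one, two, three + 1, four, notPresent)
        else (zero, one, two, three, four + 1, notPresent)) s)
      ((0 : Int), (0 : Int), (0 : Int), (0 : Int), (0 : Int), (0 : Int))
  let (zero, one, two, three, four, notPresent) := s
  [zero, one, two, three, four, notPresent]

-- ===== PORT B =====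
-- 'sum(1 for x in flat if x != -1 and x < t)' is a filtered count: ported as countP.
def rankLocationIndex_alt (indexList : List (List Int)) : List Int :=
  let flat : List Int := indexList.flatMap (fun docIndex => docIndex)
  let notPresent : Int := (PySem.List.count flat (-1) : Int)
  let cum15 : Int := (flat.countP (fun x => decide (x ≠ -1 ∧ x < 15)) : Int)
  let cum100 : Int := (flat.countP (fun x => decide (x ≠ -1 ∧ x < 100)) : Int)
  let cum500 : Int := (flat.countP (fun x => decide (x ≠ -1 ∧ x < 500)) : Int)
  let cum1000 : Int := (flat.countP (fun x => decide (x ≠ -1 ∧ x < 1000)) : Int)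
  let present : Int := (flat.length : Int) - notPresent
  [cum15, cum100 - cum15, cum500 - cum100, cum1000 - cum500, present - cum1000, notPresent]

-- ===== PRECONDITION & SPEC =====
def Spec_rankLocationIndex (indexList : List (List Int)) (out : List Int) : Prop := out = rankLocationIndex_alt indexList
instance (indexList : List (List Int)) (out : List Int) : Decidable (Spec_rankLocationIndex indexList out) := by unfold Spec_rankLocationIndex; infer_instance

-- ===== CLAIM (what is proved, stated in full; the proofs are below) =====
def Claim_equal_rankLocationIndex : Prop := ∀ (indexList : List (List Int)), Dom_rankLocationIndex indexList → Spec_rankLocationIndex indexList (rankLocationIndex indexList)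

-- ===== LEMMAS AND PROOFS =====

-- A's inner step, named for the proofs (definitionally A's inline lambda)
def pvStep (s : Int × Int × Int × Int × Int × Int) (x : Int) : Int × Int × Int × Int × Int × Int :=
  if x == -1 then (s.1, s.2.1, s.2.2.1, s.2.2.2.1, s.2.2.2.2.1, s.2.2.2.2.2 + 1)
  else if x < (15 : Int) then (s.1 + 1, s.2.1, s.2.2.1, s.2.2.2.1, s.2.2.2.2.1, s.2.2.2.2.2)
  else if x < (100 : Int) then (s.1, s.2.1 + 1, s.2.2.1, s.2.2.2.1, s.2.2.2.2.1, s.2.2.2.2.2)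
  else if x < (500 : Int) then (s.1, s.2.1, s.2.2.1 + 1, s.2.2.2.1, s.2.2.2.2.1, s.2.2.2.2.2)
  else if x < (1000 : Int) then (s.1, s.2.1, s.2.2.1, s.2.2.2.1 + 1, s.2.2.2.2.1, s.2.2.2.2.2)
  else (s.1, s.2.1, s.2.2.1, s.2.2.2.1, s.2.2.2.2.1 + 1, s.2.2.2.2.2)

theorem portA_eq (l : List (List Int)) :
    rankLocationIndex l
    = (let s := l.foldl (fun s docIndex => docIndex.foldl pvStep s) (0, 0, 0, 0, 0, 0)
       [s.1, s.2.1, s.2.2.1, s.2.2.2.1, s.2.2.2.2.1, s.2.2.2.2.2]) := rfl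

theorem foldl_nested_eq_flat (l : List (List Int)) (s : Int × Int × Int × Int × Int × Int) :
    l.foldl (fun s docIndex => docIndex.foldl pvStep s) s
    = (l.flatMap (fun d => d)).foldl pvStep s := by
  induction l generalizing s with
  | nil => rfl
  | cons d rest ih => simp [List.flatMap_cons, List.foldl_append, ih]

theorem foldl_counts (flat : List Int) (s : Int × Int × Int × Int × Int × Int) :
    flat.foldl pvStep s
    = (s.1 + (flat.countP (fun x => decide (x ≠ -1 ∧ x < 15)) : Int),
       s.2.1 + (flat.countP (fun x => decide (x ≠ -1 ∧ ¬ x < 15 ∧ x < 100)) : Int),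
       s.2.2.1 + (flat.countP (fun x => decide (x ≠ -1 ∧ ¬ x < 100 ∧ x < 500)) : Int),
       s.2.2.2.1 + (flat.countP (fun x => decide (x ≠ -1 ∧ ¬ x < 500 ∧ x < 1000)) : Int),
       s.2.2.2.2.1 + (flat.countP (fun x => decide (x ≠ -1 ∧ ¬ x < 1000)) : Int),
       s.2.2.2.2.2 + (flat.count (-1) : Int)) := by
  induction flat generalizing s with
  | nil => simp
  | cons x xs ih =>
    rw [List.foldl_cons, ih]
    simp only [pvStep, List.countP_cons, List.count_cons, beq_iff_eq, decide_eq_true_eq]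
    by_cases h0 : x = -1 <;> by_cases h1 : x < (15:Int) <;> by_cases h2 : x < (100:Int) <;>
      by_cases h3 : x < (500:Int) <;> by_cases h4 : x < (1000:Int) <;>
      simp only [h0, h1, h2, h3, h4, ne_eq, if_true, if_false] <;>
      first
        | (exfalso; omega)
        | (simp <;> push_cast <;> omega)

theorem countP_split (flat : List Int) (a b : Int) (hab : a ≤ b) :
    flat.countP (fun x => decide (x ≠ -1 ∧ x < b))
    = flat.countP (fun x => decide (x ≠ -1 ∧ x < a))
      + flat.countP (fun x => decide (x ≠ -1 ∧ ¬ x < a ∧ x < b)) := by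
  induction flat with
  | nil => rfl
  | cons x xs ih =>
    simp only [List.countP_cons, decide_eq_true_eq, ih]
    by_cases h0 : x = -1 <;> by_cases h1 : x < a <;> by_cases h2 : x < b <;>
      simp only [h0, h1, h2, not_true, not_false_iff, false_and, and_true, and_false,
        if_true, if_false, ne_eq] <;> omega

theorem countP_top (flat : List Int) (a : Int) :
    flat.length
    = flat.count (-1) + flat.countP (fun x => decide (x ≠ -1 ∧ x < a))
      + flat.countP (fun x => decide (x ≠ -1 ∧ ¬ x < a)) := by
  induction flat with
  | nil => rfl
  | cons x xs ih =>
    simp only [List.countP_cons, List.count_cons, List.length_cons, decide_eq_true_eq, ih]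
    by_cases h0 : x = -1 <;> by_cases h1 : x < a <;>
      simp only [h0, h1, not_true, not_false_iff, false_and, and_true, and_false,
        if_true, if_false, ne_eq, beq_iff_eq] <;> omega

-- ===== VERDICT (by name: the statement is the Claim_ definition above) =====
theorem rankLocationIndex_spec : Claim_equal_rankLocationIndex := by
  intro l _
  unfold Spec_rankLocationIndex rankLocationIndex_alt
  rw [portA_eq l, foldl_nested_eq_flat]
  set flat := l.flatMap (fun d => d) with hflat
  rw [foldl_counts]
  simp only [PySem.List.count]
  have h01 := countP_split flat 15 100 (by norm_num)
  have h12 := countP_split flat 100 500 (by norm_num)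
  have h23 := countP_split flat 500 1000 (by norm_num)
  have htop := countP_top flat 1000
  simp only [ne_eq] at h01 h12 h23 htop ⊢
  simp only [List.cons.injEq, and_true]
  refine ⟨?_, ?_, ?_, ?_, ?_, ?_⟩ <;> omega
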